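-- pv_equiv track=rewrite | github.com/JUNSEO-SON/InterviewPrep | 251108/그래프 탐색/graph-traversal.py | dfs
-- ===== SOURCE A (Python) =====
-- def dfs(graph,visited,v):
--     count=0
--     visited[v]=True
--     for edge in graph[v]:
--         if not visited[edge]:
--             count+=1
--             visited[edge]=True
--             count+=dfs(graph,visited,edge)
--
--
--     return count
-- ===== SOURCE B (Python) =====
-- def dfs(graph, visited, v):
--     # Iterative DFS with an explicit stack of neighbour iterators instead of recursion.
--     # Mutates `visited` in place exactly like the original; returns the number of
--     # newly visited nodes (not counting v).
--     visited[v] = True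
--     count = 0
--     stack = [iter(graph[v])]
--     while stack:
--         e = next(stack[-1], None)
--         if e is None:
--             stack.pop()
--         elif not visited[e]:
--             count += 1
--             visited[e] = True
--             stack.append(iter(graph[e]))
--     return count
-- ===== Notes on version B (the rewrite author's own statement) =====
-- stated objective: alternative
-- what changed: Replaced the recursive DFS by an iterative DFS driven by an explicit stack of neighbour iterators, counting a node when it is first marked.
-- outside the precondition, e.g. on dfs({0: [1, 2], 1: [], 2: [-2]}, [False, False, False], 0): A returns 2, B returns 2
import Mathlib
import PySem

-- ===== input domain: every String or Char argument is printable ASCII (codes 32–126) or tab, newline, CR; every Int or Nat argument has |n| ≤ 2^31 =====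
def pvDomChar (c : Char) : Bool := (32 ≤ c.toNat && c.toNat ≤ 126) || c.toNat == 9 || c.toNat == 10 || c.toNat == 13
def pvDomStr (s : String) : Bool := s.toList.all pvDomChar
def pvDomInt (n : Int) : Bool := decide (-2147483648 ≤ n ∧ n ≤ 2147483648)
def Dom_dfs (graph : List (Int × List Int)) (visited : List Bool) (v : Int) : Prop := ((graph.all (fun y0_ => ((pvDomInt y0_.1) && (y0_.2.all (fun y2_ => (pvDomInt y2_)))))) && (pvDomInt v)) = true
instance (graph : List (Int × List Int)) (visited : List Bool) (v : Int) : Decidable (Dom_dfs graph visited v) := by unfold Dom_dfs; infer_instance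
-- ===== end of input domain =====

-- B replaces A's recursion by an iterative DFS over an explicit stack of neighbour
-- iterators (same traversal order; both Pythons mutate `visited` in place identically;
-- the equivalence proved here is about the return value).

-- ===== PORT A =====
-- lemma cited by runB's decreasing_by: marking a previously-unvisited entry strictly
-- decreases the number of False entries of `visited`
theorem countFalse_pySet_lt {vis vis1 : List Bool} {e : Int}
    (hg : PySem.List.pyGet? vis e = some false)
    (hs : PySem.List.pySet? vis e true = some vis1) :
    vis1.count false < vis.count false := by
  rw [PySem.List.pyGet?] at hg
  rw [PySem.List.pySet?] at hs
  cases hk : PySem.List.pyIdx? vis.length e with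
  | none => simp [hk] at hg
  | some k =>
    simp only [hk, Option.bind_some, Option.map_some, Option.some.injEq] at hg hs
    subst hs
    have hklt : k < vis.length := by
      by_contra hc
      rw [List.getElem?_eq_none (by omega)] at hg
      cases hg
    have hgk : vis[k] = false := by
      rw [List.getElem?_eq_getElem hklt] at hg
      exact Option.some.inj hg
    have h1 : List.count false (vis.set k true) =
        (List.count false vis - if (vis[k] == false) = true then 1 else 0) +
          if (true == false) = true then 1 else 0 := List.count_set hklt
    have hpos : 0 < List.count false vis :=
      List.count_pos_iff.mpr (hgk ▸ List.getElem_mem hklt)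
    simp [hgk] at h1
    omega

-- A's recursive `dfs`, transliterated: `dfsCall` is the body of Python's `dfs`
-- (visited[v]=True, then iterate graph[v]); `dfsAux` is its for-loop.  The Nat fuel is
-- only a totality guard (every recursive call has just flipped a False entry of
-- `visited` to True, so `visited.count false + 2` is always enough fuel; proved below
-- in dfsAux_total).  `none` = the Python raises (IndexError/KeyError); excluded by Pre_.
mutual
def dfsAux (fuel : Nat) (g : List (Int × List Int)) (vis : List Bool) (L : List Int) : Option (Int × List Bool) :=
  match L with
  | [] => some (0, vis)
  | e :: es =>
    match PySem.List.pyGet? vis e with        -- if not visited[edge]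
    | none => none
    | some true => dfsAux fuel g vis es
    | some false =>
      match PySem.List.pySet? vis e true with -- visited[edge] = True
      | none => none
      | some vis1 =>
        match dfsCall fuel g vis1 e with      -- count += dfs(graph, visited, edge)
        | none => none
        | some (c1, vis2) =>
          match dfsAux fuel g vis2 es with
          | none => none
          | some (c2, vis3) => some (1 + c1 + c2, vis3)
  termination_by (fuel, L.length + 1)
def dfsCall (fuel : Nat) (g : List (Int × List Int)) (vis : List Bool) (v : Int) : Option (Int × List Bool) :=
  match fuel with
  | 0 => none
  | m + 1 =>
    match PySem.List.pySet? vis v true with   -- visited[v] = True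
    | none => none
    | some vis' =>
      match g.lookup v with                   -- graph[v]
      | none => none
      | some edges => dfsAux m g vis' edges
  termination_by (fuel, 0)
end

def dfs (graph : List (Int × List Int)) (visited : List Bool) (v : Int) : Int :=
  ((dfsCall (visited.count false + 2) graph visited v).map Prod.fst).getD 0

-- ===== PORT B =====
-- the while-loop of Source B; `stack` holds the not-yet-consumed suffix of each iterator
def runB (g : List (Int × List Int)) (cnt : Int) (vis : List Bool) (stack : List (List Int)) : Option (Int × List Bool) :=
  match stack with
  | [] => some (cnt, vis)                     -- while stack: … falls through
  | [] :: S => runB g cnt vis S               -- e is None: stack.pop()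
  | (e :: es) :: S =>
    match _h : PySem.List.pyGet? vis e with   -- elif not visited[e]
    | none => none
    | some true => runB g cnt vis (es :: S)
    | some false =>
      match _h2 : PySem.List.pySet? vis e true with  -- count += 1; visited[e] = True
      | none => none
      | some vis1 =>
        match g.lookup e with                 -- stack.append(iter(graph[e]))
        | none => none
        | some edges => runB g (cnt + 1) vis1 (edges :: es :: S)
termination_by (vis.count false, (stack.map List.length).sum + stack.length)
decreasing_by
  · exact Prod.Lex.right _ (by simp)
  · exact Prod.Lex.right _ (by simp)
  · exact Prod.Lex.left _ _ (countFalse_pySet_lt _h _h2)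

def dfs_alt (graph : List (Int × List Int)) (visited : List Bool) (v : Int) : Int :=
  match PySem.List.pySet? visited v true with -- visited[v] = True
  | none => 0
  | some vis0 =>
    match graph.lookup v with                 -- stack = [iter(graph[v])]
    | none => 0
    | some edges => ((runB graph 0 vis0 [edges]).map Prod.fst).getD 0

-- ===== PRECONDITION & SPEC =====
-- `visited1` = visited after Python's first statement `visited[v] = True`
def pvVisited1 (visited : List Bool) (v : Int) : List Bool := PySem.List.pySetD visited v true

-- two node values denote the same cell of `visited` (Python negative-index wraparound)
def pvCellEq (n : Nat) (a b : Int) : Bool := PySem.List.pyIdx? n a == PySem.List.pyIdx? n b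

-- edge-list certificate: walking a node u's adjacency list (pre = edges already
-- examined), every edge is a valid index, and every edge whose cell is unvisited
-- after `visited[v]=True` is either itself certified (in C) or aliases a cell that
-- is certainly already marked when it is examined: v's cell is marked up front,
-- u's cell at entry, and the cell of every earlier edge of the same list
def pvEdgesOK (n : Nat) (C : List Int) (vis1 : List Bool) (u : Int) : List Int → List Int → Bool
  | _pre, [] => true
  | pre, e :: es =>
      decide (PySem.Raise.InRange n e) &&
      ((!(PySem.List.pyGet? vis1 e == some false)) ||
        (C.contains e || pvCellEq n e u || pre.any (fun w => pvCellEq n w e))) &&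
      pvEdgesOK n C vis1 u (pre ++ [e]) es

-- A raises IndexError/KeyError iff the traversal reaches a bad node.  Pre_ demands a
-- closed-form certificate: a set C of node values (from v and the keys) containing v,
-- whose members are valid indices and keys and whose edge lists satisfy pvEdgesOK.
-- Pre_ excludes the raising inputs and, inevitably, a residual sliver of returning
-- ones: inputs where an edge only avoids KeyError because its wraparound-aliased cell
-- happens to be marked first in an earlier sibling subtree — there A's returning at
-- all depends on the dynamic traversal order and no closed-form input condition can
-- admit them without also admitting raising inputs (see cites; B returns A's value there too).
def Pre_dfs (graph : List (Int × List Int)) (visited : List Bool) (v : Int) : Prop :=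
  PySem.Raise.InRange visited.length v ∧ (graph.lookup v).isSome = true ∧
    ∃ C ∈ (v :: graph.map Prod.fst).sublists, v ∈ C ∧
      ∀ u ∈ C, PySem.Raise.InRange visited.length u ∧ (graph.lookup u).isSome = true ∧
        pvEdgesOK visited.length C (pvVisited1 visited v) u [] ((graph.lookup u).getD []) = true
instance (graph : List (Int × List Int)) (visited : List Bool) (v : Int) : Decidable (Pre_dfs graph visited v) := by unfold Pre_dfs; infer_instance

def pvWitness_dfs : (List (Int × List Int)) × List Bool × Int :=
  ([(0, [2, -1]), (1, [0]), (2, [1])], [false, false, false], 0)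

def Spec_dfs (graph : List (Int × List Int)) (visited : List Bool) (v : Int) (out : Int) : Prop := out = dfs_alt graph visited v
instance (graph : List (Int × List Int)) (visited : List Bool) (v : Int) (out : Int) : Decidable (Spec_dfs graph visited v out) := by unfold Spec_dfs; infer_instance

-- ===== CLAIM (what is proved, stated in full; the proofs are below) =====
def Claim_equal_dfs : Prop := ∀ (graph : List (Int × List Int)) (visited : List Bool) (v : Int), Dom_dfs graph visited v → Pre_dfs graph visited v → Spec_dfs graph visited v (dfs graph visited v)

-- ===== LEMMAS AND PROOFS =====

theorem length_pySet {vis vis1 : List Bool} {e : Int} {b : Bool}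
    (hs : PySem.List.pySet? vis e b = some vis1) : vis1.length = vis.length := by
  rw [PySem.List.pySet?] at hs
  cases hk : PySem.List.pyIdx? vis.length e with
  | none => simp [hk] at hs
  | some k =>
    simp only [hk, Option.map_some, Option.some.injEq] at hs
    subst hs; simp

theorem countFalse_pySet_le {vis vis1 : List Bool} {e : Int}
    (hs : PySem.List.pySet? vis e true = some vis1) :
    vis1.count false ≤ vis.count false := by
  rw [PySem.List.pySet?] at hs
  cases hk : PySem.List.pyIdx? vis.length e with
  | none => simp [hk] at hs
  | some k =>
    simp only [hk, Option.map_some, Option.some.injEq] at hs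
    subst hs
    by_cases hklt : k < vis.length
    · have h1 := List.count_set (l := vis) (a := true) (b := false) hklt
      simp at h1
      rw [h1]
      split <;> omega
    · rw [List.set_eq_of_length_le (by omega)]

theorem pyIdx_lt {n : Nat} {i : Int} {k : Nat}
    (h : PySem.List.pyIdx? n i = some k) : k < n := by
  rw [PySem.List.pyIdx?] at h
  split_ifs at h <;> simp_all <;> omega

theorem get_set_self {vis vis1 : List Bool} {e : Int} {b : Bool}
    (hs : PySem.List.pySet? vis e b = some vis1) :
    PySem.List.pyGet? vis1 e = some b := by
  rw [PySem.List.pySet?] at hs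
  rw [PySem.List.pyGet?]
  cases hk : PySem.List.pyIdx? vis.length e with
  | none => simp [hk] at hs
  | some k =>
    simp only [hk, Option.map_some, Option.some.injEq] at hs
    subst hs
    have hklt : k < vis.length := pyIdx_lt hk
    rw [show (vis.set k b).length = vis.length by simp, hk]
    simp [hklt]

theorem set_same {vis : List Bool} {e : Int} {b : Bool}
    (hg : PySem.List.pyGet? vis e = some b) :
    PySem.List.pySet? vis e b = some vis := by
  rw [PySem.List.pyGet?] at hg
  rw [PySem.List.pySet?]
  cases hk : PySem.List.pyIdx? vis.length e with
  | none => simp [hk] at hg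
  | some k =>
    simp only [hk, Option.bind_some] at hg
    have hklt : k < vis.length := pyIdx_lt hk
    have hgk : vis[k] = b := by
      rw [List.getElem?_eq_getElem hklt] at hg
      exact Option.some.inj hg
    simp only [Option.map_some, Option.some.injEq]
    rw [← hgk, List.set_getElem_self]

-- aliased cells read the same value
theorem pyGet?_congr_cell {vis : List Bool} {a b : Int}
    (h : PySem.List.pyIdx? vis.length a = PySem.List.pyIdx? vis.length b) :
    PySem.List.pyGet? vis a = PySem.List.pyGet? vis b := by
  rw [PySem.List.pyGet?, PySem.List.pyGet?, h]

-- a length-preserving, False-monotone update preserves True cells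
theorem pyGet?_true_mono {vis vis' : List Bool} (hlen : vis'.length = vis.length)
    (hmono : ∀ w, PySem.List.pyGet? vis' w = some false → PySem.List.pyGet? vis w = some false)
    {w : Int} (ht : PySem.List.pyGet? vis w = some true) :
    PySem.List.pyGet? vis' w = some true := by
  cases hb : PySem.List.pyGet? vis' w with
  | none =>
    exfalso
    rw [PySem.List.pyGet?_eq_none_iff, hlen] at hb
    have hnone : PySem.List.pyGet? vis w = none := by
      rw [PySem.List.pyGet?_eq_none_iff]; exact hb
    rw [hnone] at ht; cases ht
  | some b =>
    cases b with
    | false => rw [hmono w hb] at ht; cases ht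
    | true => rfl

-- step equations for runB (its match carries discriminant hypotheses, so we expose
-- one equation per branch once and for all)
theorem runB_pop {g : List (Int × List Int)} {cnt : Int} {vis : List Bool} {S : List (List Int)} :
    runB g cnt vis ([] :: S) = runB g cnt vis S := by
  rw [runB]

theorem runB_skip {g : List (Int × List Int)} {cnt : Int} {vis : List Bool} {e : Int}
    {es : List Int} {S : List (List Int)} (hb : PySem.List.pyGet? vis e = some true) :
    runB g cnt vis ((e :: es) :: S) = runB g cnt vis (es :: S) := by
  rw [runB]
  split <;> simp_all

theorem runB_mark {g : List (Int × List Int)} {cnt : Int} {vis vis1 : List Bool} {e : Int}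
    {es edges : List Int} {S : List (List Int)}
    (hb : PySem.List.pyGet? vis e = some false)
    (hs : PySem.List.pySet? vis e true = some vis1)
    (hlk : List.lookup e g = some edges) :
    runB g cnt vis ((e :: es) :: S) = runB g (cnt + 1) vis1 (edges :: es :: S) := by
  rw [runB]
  split
  · simp_all
  · simp_all
  · split
    · simp_all
    · rename_i h2
      rw [hs] at h2
      obtain rfl : vis1 = _ := by injection h2
      rw [hlk]

-- the simulation: running B's stack machine on `L :: S` is running A's for-loop on L
-- and then continuing with stack S
theorem simB (g : List (Int × List Int)) :
    ∀ (fuel : Nat) (L : List Int) (vis : List Bool) (S : List (List Int)) (cnt c' : Int) (vis' : List Bool),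
      dfsAux fuel g vis L = some (c', vis') →
      runB g cnt vis (L :: S) = runB g (cnt + c') vis' S := by
  intro fuel
  induction fuel using Nat.strong_induction_on with
  | _ fuel IHf =>
    intro L
    induction L with
    | nil =>
      intro vis S cnt c' vis' h
      rw [dfsAux] at h
      simp only [Option.some.injEq, Prod.mk.injEq] at h
      obtain ⟨rfl, rfl⟩ := h
      rw [runB_pop]
      simp
    | cons e es IH =>
      intro vis S cnt c' vis' h
      rw [dfsAux] at h
      cases hb : PySem.List.pyGet? vis e with
      | none => simp [hb] at h
      | some b =>
        cases b with
        | true =>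
          simp only [hb] at h
          rw [runB_skip hb]
          exact IH vis S cnt c' vis' h
        | false =>
          simp only [hb] at h
          cases hs : PySem.List.pySet? vis e true with
          | none => simp [hs] at h
          | some vis1 =>
            simp only [hs] at h
            cases hC : dfsCall fuel g vis1 e with
            | none => simp [hC] at h
            | some p1 =>
              obtain ⟨c1, vis2⟩ := p1
              simp only [hC] at h
              cases hA2 : dfsAux fuel g vis2 es with
              | none => simp [hA2] at h
              | some p2 =>
                obtain ⟨c2, vis3⟩ := p2
                simp only [hA2, Option.some.injEq, Prod.mk.injEq] at h
                obtain ⟨rfl, rfl⟩ := h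
                cases fuel with
                | zero => rw [dfsCall] at hC; cases hC
                | succ m =>
                  rw [dfsCall] at hC
                  have hset2 : PySem.List.pySet? vis1 e true = some vis1 :=
                    set_same (get_set_self hs)
                  simp only [hset2] at hC
                  cases hlk : List.lookup e g with
                  | none => simp [hlk] at hC
                  | some edges =>
                    simp only [hlk] at hC
                    rw [runB_mark hb hs hlk]
                    rw [IHf m (Nat.lt_succ_self m) edges vis1 (es :: S) (cnt + 1) c1 vis2 hC]
                    rw [IH vis2 S (cnt + 1 + c1) c2 vis3 hA2]
                    have : cnt + 1 + c1 + c2 = cnt + (1 + c1 + c2) := by ring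
                    rw [this]

-- marking a cell never turns a True cell False
theorem pyGet_pySet_mono {vis vis1 : List Bool} {e u : Int}
    (hs : PySem.List.pySet? vis e true = some vis1)
    (hu : PySem.List.pyGet? vis1 u = some false) :
    PySem.List.pyGet? vis u = some false := by
  rw [PySem.List.pySet?] at hs
  cases hk : PySem.List.pyIdx? vis.length e with
  | none => simp [hk] at hs
  | some k =>
    simp only [hk, Option.map_some, Option.some.injEq] at hs
    subst hs
    rw [PySem.List.pyGet?] at hu ⊢
    rw [List.length_set] at hu
    cases hku : PySem.List.pyIdx? vis.length u with
    | none => simp [hku] at hu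
    | some ku =>
      simp only [hku, Option.bind_some] at hu ⊢
      rw [List.getElem?_set] at hu
      split at hu
      · split at hu <;> simp_all
      · exact hu

theorem pySetD_of_pySet {vis vis1 : List Bool} {e : Int} {b : Bool}
    (hs : PySem.List.pySet? vis e b = some vis1) :
    PySem.List.pySetD vis e b = vis1 := by
  rw [PySem.List.pySetD, hs]
  rfl

-- fuel sufficiency and raise-freedom: given the Pre_ certificate C, A's for-loop on
-- any certified node's remaining edge list returns, never runs out of fuel, never
-- increases the number of False entries and only turns False entries True
theorem dfsAux_total (g : List (Int × List Int)) (visited : List Bool) (v : Int) (C : List Int)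
    (hC : ∀ u ∈ C, PySem.Raise.InRange visited.length u ∧ (g.lookup u).isSome = true ∧
        pvEdgesOK visited.length C (pvVisited1 visited v) u [] ((g.lookup u).getD []) = true) :
    ∀ (fuel : Nat) (vis : List Bool) (u : Int) (pre L : List Int),
      u ∈ C →
      pvEdgesOK visited.length C (pvVisited1 visited v) u pre L = true →
      vis.count false < fuel →
      vis.length = visited.length →
      (∀ w, PySem.List.pyGet? vis w = some false →
        PySem.List.pyGet? (pvVisited1 visited v) w = some false) →
      PySem.List.pyGet? vis u = some true →
      (∀ w ∈ pre, PySem.List.pyGet? vis w = some true) →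
      ∃ c vis', dfsAux fuel g vis L = some (c, vis') ∧
        vis'.count false ≤ vis.count false ∧ vis'.length = vis.length ∧
        (∀ w, PySem.List.pyGet? vis' w = some false → PySem.List.pyGet? vis w = some false) := by
  intro fuel
  induction fuel using Nat.strong_induction_on with
  | _ fuel IHf =>
    intro vis u pre L
    induction L generalizing vis pre with
    | nil =>
      intro _ _ _ _ _ _ _
      exact ⟨0, vis, by rw [dfsAux], le_refl _, rfl, fun w hw => hw⟩
    | cons e es IH =>
      intro huC hok hcf hlen hmono huT hpreT
      rw [pvEdgesOK] at hok
      simp only [Bool.and_eq_true, decide_eq_true_eq] at hok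
      obtain ⟨⟨hinE, halias⟩, hrest⟩ := hok
      obtain ⟨b, hb⟩ : ∃ b, PySem.List.pyGet? vis e = some b := by
        cases h : PySem.List.pyGet? vis e with
        | none =>
          rw [PySem.List.pyGet?_eq_none_iff, hlen] at h
          exact absurd hinE h
        | some b => exact ⟨b, rfl⟩
      cases b with
      | true =>
        obtain ⟨c, vis', h1, h2, h3, h4⟩ :=
          IH vis (pre ++ [e]) huC hrest hcf hlen hmono huT
            (by intro w hw
                rcases List.mem_append.mp hw with hw | hw
                · exact hpreT w hw
                · rw [List.mem_singleton.mp hw]; exact hb)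
        exact ⟨c, vis', by rw [dfsAux]; simp only [hb]; exact h1, h2, h3, h4⟩
      | false =>
        have he1 : PySem.List.pyGet? (pvVisited1 visited v) e = some false := hmono e hb
        -- the alias disjuncts are impossible: their cells read True in vis
        have heC : e ∈ C := by
          rw [he1] at halias
          simp only [beq_self_eq_true, Bool.not_true, Bool.false_or, Bool.or_eq_true,
            List.contains_eq_mem, decide_eq_true_eq, List.any_eq_true,
            pvCellEq, beq_iff_eq] at halias
          rcases halias with (h | h) | ⟨w, hw, hcell⟩
          · exact h
          · exfalso
            rw [← hlen] at h
            rw [pyGet?_congr_cell h, huT] at hb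
            cases hb
          · exfalso
            rw [← hlen] at hcell
            rw [← pyGet?_congr_cell hcell, hpreT w hw] at hb
            cases hb
        obtain ⟨hinC, hkeyC, hedgesC⟩ := hC e heC
        obtain ⟨vis1, hs1⟩ : ∃ y, PySem.List.pySet? vis e true = some y := by
          cases h : PySem.List.pySet? vis e true with
          | none =>
            rw [PySem.List.pySet?_eq_none_iff, hlen] at h
            exact absurd hinE h
          | some y => exact ⟨y, rfl⟩
        have hc1 : vis1.count false < vis.count false := countFalse_pySet_lt hb hs1
        have hl1 : vis1.length = vis.length := length_pySet hs1
        have hmono1 : ∀ w, PySem.List.pyGet? vis1 w = some false →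
            PySem.List.pyGet? vis w = some false := fun w hw => pyGet_pySet_mono hs1 hw
        cases fuel with
        | zero => omega
        | succ m =>
          obtain ⟨edges, hlk⟩ : ∃ y, List.lookup e g = some y :=
            Option.isSome_iff_exists.mp hkeyC
          rw [hlk] at hedgesC
          simp only [Option.getD_some] at hedgesC
          obtain ⟨c1, vis2, hA, hc2, hl2, hm2⟩ :=
            IHf m (Nat.lt_succ_self m) vis1 e [] edges heC hedgesC (by omega) (by omega)
              (fun w hw => hmono w (hmono1 w hw))
              (get_set_self hs1)
              (by intro w hw; cases hw)
          obtain ⟨c2, vis3, hA2, hc3, hl3, hm3⟩ :=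
            IH vis2 (pre ++ [e]) huC hrest (by omega) (by omega)
              (fun w hw => hmono w (hmono1 w (hm2 w hw)))
              (pyGet?_true_mono (by omega) hm2 (pyGet?_true_mono hl1 hmono1 huT))
              (by intro w hw
                  rcases List.mem_append.mp hw with hw | hw
                  · exact pyGet?_true_mono (by omega) hm2
                      (pyGet?_true_mono hl1 hmono1 (hpreT w hw))
                  · rw [List.mem_singleton.mp hw]
                    exact pyGet?_true_mono (by omega) hm2 (get_set_self hs1))
          refine ⟨1 + c1 + c2, vis3, ?_, by omega, by omega,
            fun w hw => hmono1 w (hm2 w (hm3 w hw))⟩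
          rw [dfsAux]
          simp only [hb, hs1]
          have hcall : dfsCall (m + 1) g vis1 e = some (c1, vis2) := by
            rw [dfsCall]
            have hset2 : PySem.List.pySet? vis1 e true = some vis1 :=
              set_same (get_set_self hs1)
            simp only [hset2, hlk]
            exact hA
          simp only [hcall, hA2]

-- ===== VERDICT (by name: the statement is the Claim_ definition above) =====
theorem dfs_spec : Claim_equal_dfs := by
  intro graph visited v _hdom hpre
  obtain ⟨hv, hkey, C, _hsub, hvC, hC⟩ := hpre
  unfold Spec_dfs dfs dfs_alt
  obtain ⟨vis0, hs0⟩ : ∃ y, PySem.List.pySet? visited v true = some y := by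
    cases h : PySem.List.pySet? visited v true with
    | none => exact absurd ((PySem.List.pySet?_eq_none_iff _ _ _).mp h) (not_not_intro hv)
    | some y => exact ⟨y, rfl⟩
  have hvis1 : pvVisited1 visited v = vis0 := pySetD_of_pySet hs0
  obtain ⟨edges, hlk⟩ : ∃ y, graph.lookup v = some y := Option.isSome_iff_exists.mp hkey
  have hlen0 : vis0.length = visited.length := length_pySet hs0
  have hcnt0 : vis0.count false ≤ visited.count false := countFalse_pySet_le hs0
  obtain ⟨_, _, hvedges⟩ := hC v hvC
  rw [hlk] at hvedges
  simp only [Option.getD_some] at hvedges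
  obtain ⟨c, visF, hrun, _, _, _⟩ :=
    dfsAux_total graph visited v C hC (visited.count false + 1) vis0 v [] edges
      hvC hvedges (by omega) hlen0
      (by intro w hw; rwa [hvis1])
      (get_set_self hs0)
      (by intro w hw; cases hw)
  rw [show visited.count false + 2 = (visited.count false + 1) + 1 from rfl]
  rw [dfsCall]
  simp only [hs0, hlk, hrun]
  rw [simB graph (visited.count false + 1) edges vis0 [] 0 c visF hrun]
  rw [runB]
  simp
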